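-- pv_equiv track=rewrite | github.com/JinYuKiKK0/Stata-Executor-MCP | stata_executor/engine/output_parser.py | extract_last_command_block
-- ===== SOURCE A (Python) =====
-- def extract_last_command_block(lines: list[str]) -> tuple[int | None, str | None]:
--     block_start: int | None = None
--     block_lines: list[str] = []
--     blocks: list[tuple[int, str]] = []
--
--     for index, raw_line in enumerate(lines):
--         if raw_line.startswith(". "):
--             if block_start is not None and block_lines:
--                 blocks.append((block_start, "\n".join(block_lines).strip()))
--             block_start = index
--             block_lines = [raw_line[2:].rstrip()]
--             continue
--
--         if raw_line.startswith("> ") and block_start is not None: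
--             block_lines.append(raw_line[2:].rstrip())
--
--     if block_start is not None and block_lines:
--         blocks.append((block_start, "\n".join(block_lines).strip()))
--
--     if not blocks:
--         return None, None
--     return blocks[-1]
-- ===== SOURCE B (Python) =====
-- def extract_last_command_block(lines: list[str]) -> tuple[int | None, str | None]:
--     found = None
--     i = len(lines) - 1
--     for line in reversed(lines):
--         if line.startswith(". "):
--             found = (i, line[2:].rstrip())
--             break
--         i -= 1
--     if found is None:
--         return None, None
--     block_start, head = found
--     parts = [head] + [l[2:].rstrip() for l in lines[block_start + 1:] if l.startswith("> ")]
--     return block_start, "\n".join(parts).strip()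
-- ===== Notes on version B (the rewrite author's own statement) =====
-- stated objective: simpler
-- what changed: Instead of accumulating every command block left-to-right in a (start, lines, blocks) state, B finds the last '. ' line by a single reverse scan (stopping there) and then collects only that block's '> ' continuations from the suffix.
import Mathlib
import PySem

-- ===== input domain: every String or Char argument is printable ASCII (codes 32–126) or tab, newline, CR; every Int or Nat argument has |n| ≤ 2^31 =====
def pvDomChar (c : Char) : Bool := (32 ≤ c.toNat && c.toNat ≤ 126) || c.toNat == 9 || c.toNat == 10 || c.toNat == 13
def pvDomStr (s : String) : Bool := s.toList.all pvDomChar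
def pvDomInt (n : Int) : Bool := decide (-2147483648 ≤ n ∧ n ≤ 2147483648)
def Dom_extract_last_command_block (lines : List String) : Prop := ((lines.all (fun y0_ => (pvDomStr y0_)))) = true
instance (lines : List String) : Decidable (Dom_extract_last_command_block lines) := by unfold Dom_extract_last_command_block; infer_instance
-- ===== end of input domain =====

-- B locates the last '. ' line by one reverse scan and then collects only that block's
-- continuations, instead of accumulating every block left to right (objective: simpler).

-- ===== PORT A =====
-- line[2:].rstrip(), shared by both ports (the same expression appears in A and in B)
def pvTail (l : String) : String := PySem.Str.rstrip (PySem.Str.slice l (some 2) none)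

-- one iteration of A's for-loop; state = (block_start, block_lines, blocks)
def pvStepA (st : Option Int × List String × List (Int × String)) (p : Int × String) :
    Option Int × List String × List (Int × String) :=
  if PySem.Str.startswith p.2 ". " then
    (some p.1, [pvTail p.2],
      match st.1 with
      | some s => if st.2.1 ≠ [] then st.2.2 ++ [(s, PySem.Str.strip (PySem.Str.join "\n" st.2.1))] else st.2.2
      | none => st.2.2)
  else if PySem.Str.startswith p.2 "> " && st.1.isSome then
    (st.1, st.2.1 ++ [pvTail p.2], st.2.2)
  else st

def extract_last_command_block (lines : List String) : Option Int × Option String :=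
  let st := (PySem.List.enumerate lines 0).foldl pvStepA (none, [], [])
  let blocks :=
    match st.1 with
    | some s => if st.2.1 ≠ [] then st.2.2 ++ [(s, PySem.Str.strip (PySem.Str.join "\n" st.2.1))] else st.2.2
    | none => st.2.2
  match blocks.getLast? with
  | none => (none, none)
  | some (i, s) => (some i, some s)

-- ===== PORT B =====
-- reverse scan: first '. ' line of the reversed list, with its original index i
def pvFindLast : List String → Int → Option (Int × String)
  | [], _ => none
  | l :: ls, i =>
    if PySem.Str.startswith l ". " then some (i, pvTail l)
    else pvFindLast ls (i - 1)

def extract_last_command_block_alt (lines : List String) : Option Int × Option String :=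
  match pvFindLast lines.reverse ((lines.length : Int) - 1) with
  | none => (none, none)
  | some (bs, head) =>
    let parts := head ::
      (PySem.List.slice lines (some (bs + 1)) none).filterMap
        (fun l => if PySem.Str.startswith l "> " then some (pvTail l) else none)
    (some bs, some (PySem.Str.strip (PySem.Str.join "\n" parts)))

-- ===== PRECONDITION & SPEC =====
def Spec_extract_last_command_block (lines : List String) (out : Option Int × Option String) : Prop := out = extract_last_command_block_alt lines
instance (lines : List String) (out : Option Int × Option String) : Decidable (Spec_extract_last_command_block lines out) := by unfold Spec_extract_last_command_block; infer_instance

-- ===== CLAIM (what is proved, stated in full; the proofs are below) =====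
def Claim_equal_extract_last_command_block : Prop := ∀ (lines : List String), Dom_extract_last_command_block lines → Spec_extract_last_command_block lines (extract_last_command_block lines)

-- ===== LEMMAS AND PROOFS =====

-- A's loop as a named fold (definitionally the fold inside the A port)
def pvFoldA (q : List String) : Option Int × List String × List (Int × String) :=
  (PySem.List.enumerate q 0).foldl pvStepA (none, [], [])

-- index of the LAST line starting with '. ', as a Nat (proof-side specification)
def pvLastP : List String → Option Nat
  | [] => none
  | l :: ls =>
    match pvLastP ls with
    | some j => some (j + 1)
    | none => if PySem.Chars.startswith l.toList ['.', ' '] then some 0 else none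

-- the continuation lines '> ' of a suffix, already trimmed
def pvConts (ls : List String) : List String :=
  ls.filterMap (fun l => if PySem.Chars.startswith l.toList ['>', ' '] then some (pvTail l) else none)

lemma pvLastP_snoc (q : List String) (x : String) :
    pvLastP (q ++ [x]) =
      if PySem.Chars.startswith x.toList ['.', ' '] then some q.length else pvLastP q := by
  induction q with
  | nil => simp [pvLastP]
  | cons a q ih =>
    simp only [List.cons_append, pvLastP, ih, List.length_cons]
    by_cases hx : PySem.Chars.startswith x.toList ['.', ' '] = true
    · simp [hx]
    · simp [hx]

lemma pvLastP_lt (q : List String) (j : Nat) (h : pvLastP q = some j) : j < q.length := by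
  induction q generalizing j with
  | nil => simp [pvLastP] at h
  | cons a q ih =>
    simp only [pvLastP] at h
    cases hq : pvLastP q with
    | some k => rw [hq] at h; cases h; simpa using Nat.succ_lt_succ (ih k hq)
    | none =>
      rw [hq] at h
      by_cases ha : PySem.Chars.startswith a.toList ['.', ' '] = true
      · simp [ha] at h; simp only [List.length_cons]; omega
      · simp [ha] at h

lemma pvConts_snoc (ls : List String) (x : String) :
    pvConts (ls ++ [x]) =
      pvConts ls ++ (if PySem.Chars.startswith x.toList ['>', ' '] then [pvTail x] else []) := by
  simp only [pvConts, List.filterMap_append, List.filterMap_cons, List.filterMap_nil]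
  by_cases hx : PySem.Chars.startswith x.toList ['>', ' '] = true <;> simp [hx]

-- what A's loop state contains after processing q; the blocks list is empty
-- while no '. ' line has been seen
lemma pvA_loop (q : List String) :
    (pvFoldA q).1 = (pvLastP q).map (fun j => (j : Int)) ∧
    (pvFoldA q).2.1 = (match pvLastP q with
      | none => []
      | some j => pvTail (q.getD j "") :: pvConts (q.drop (j + 1))) ∧
    (pvLastP q = none → (pvFoldA q).2.2 = []) := by
  induction q using List.reverseRecOn with
  | nil => exact ⟨rfl, rfl, fun _ => rfl⟩
  | append_singleton q x ih =>
    obtain ⟨h1, h2, h3⟩ := ih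
    have hstep : pvFoldA (q ++ [x]) = pvStepA (pvFoldA q) ((q.length : Int), x) := by
      rw [pvFoldA, PySem.List.enumerate_append, List.foldl_append]
      simp [PySem.List.enumerate, pvFoldA]
    rw [hstep]
    rw [pvLastP_snoc]
    by_cases hx : PySem.Chars.startswith x.toList ['.', ' '] = true
    · have hget : (q ++ [x]).getD q.length "" = x := by
        simp [List.getD, List.getElem?_append_right (le_refl q.length)]
      have hdrop : (q ++ [x]).drop (q.length + 1) = [] :=
        List.drop_eq_nil_of_le (by simp)
      refine ⟨?_, ?_, ?_⟩ <;> simp [pvStepA, hx, hget, hdrop, pvConts]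
    · cases hq : pvLastP q with
      | none =>
        have hbs : (pvFoldA q).1 = none := by rw [h1, hq]; rfl
        refine ⟨?_, ?_, ?_⟩ <;>
          simp [pvStepA, hx, hbs, h2, hq, h3 hq]
      | some j =>
        have hj : j < q.length := pvLastP_lt q j hq
        have hget : (q ++ [x])[j]? = q[j]? := List.getElem?_append_left hj
        have hdrop : (q ++ [x]).drop (j + 1) = q.drop (j + 1) ++ [x] := by
          rw [List.drop_append]
          have h0 : j + 1 - q.length = 0 := by omega
          rw [h0]
          rfl
        have hbs : (pvFoldA q).1 = some (j : Int) := by rw [h1, hq]; rfl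
        by_cases hc : PySem.Chars.startswith x.toList ['>', ' '] = true
        · refine ⟨?_, ?_, ?_⟩ <;>
            simp [pvStepA, hx, hc, hbs, h1, h2, hq, hget, hdrop, pvConts_snoc]
        · refine ⟨?_, ?_, ?_⟩ <;>
            simp [pvStepA, hx, hc, hbs, h1, h2, hq, hget, hdrop, pvConts_snoc]

-- B's reverse scan finds exactly the last '. ' index together with its trimmed text
lemma pvFindLast_eq (q : List String) :
    pvFindLast q.reverse ((q.length : Int) - 1) =
      (pvLastP q).map (fun j : Nat => ((j : Int), pvTail (q.getD j ""))) := by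
  induction q using List.reverseRecOn with
  | nil => simp [pvFindLast, pvLastP]
  | append_singleton q x ih =>
    have hlen : (((q ++ [x]).length : Int) - 1) = (q.length : Int) := by
      simp
    rw [List.reverse_append, pvLastP_snoc]
    simp only [List.reverse_singleton, List.singleton_append, pvFindLast, hlen]
    by_cases hx : PySem.Chars.startswith x.toList ['.', ' '] = true
    · have hget : (q ++ [x]).getD q.length "" = x := by
        simp [List.getD, List.getElem?_append_right (le_refl q.length)]
      simp [hx, hget]
    · rw [if_neg (by simpa using hx)]
      simp only [hx, if_false, Bool.false_eq_true]
      rw [ih]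
      cases hq : pvLastP q with
      | none => simp
      | some j =>
        have hj : j < q.length := pvLastP_lt q j hq
        have hget : (q ++ [x])[j]? = q[j]? := List.getElem?_append_left hj
        simp [hget]

-- ===== VERDICT (by name: the statement is the Claim_ definition above) =====
theorem extract_last_command_block_spec : Claim_equal_extract_last_command_block := by
  intro lines _
  unfold Spec_extract_last_command_block
  obtain ⟨h1, h2, h3⟩ := pvA_loop lines
  have hA : extract_last_command_block lines =
      (match (match (pvFoldA lines).1 with
        | some s => if (pvFoldA lines).2.1 ≠ [] then
            (pvFoldA lines).2.2 ++ [(s, PySem.Str.strip (PySem.Str.join "\n" (pvFoldA lines).2.1))]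
          else (pvFoldA lines).2.2
        | none => (pvFoldA lines).2.2).getLast? with
      | none => (none, none)
      | some (i, s) => (some i, some s)) := rfl
  rw [hA]
  unfold extract_last_command_block_alt
  rw [pvFindLast_eq]
  cases hq : pvLastP lines with
  | none =>
    rw [h1, h2, hq]
    simp [h3 hq]
  | some j =>
    have hslice : PySem.List.slice lines (some ((j : Int) + 1)) none = lines.drop (j + 1) := by
      have hc : ((j : Int) + 1) = ((j + 1 : Nat) : Int) := by push_cast; ring
      rw [hc, PySem.List.slice_from_natCast]
    rw [h1, h2, hq]
    simp only [Option.map_some]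
    rw [hslice]
    simp [pvConts, List.getLast?_append]
    rfl
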